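-- pv_equiv track=rewrite | github.com/bilalzafar11/Email_Detector_App | app.py | custom_filter
-- ===== SOURCE A (Python) =====
-- def custom_filter(email_text, model_prediction):
--     trusted_keywords = [
--         "meezan bank", "hbl", "mcb", "ubl", "askari bank",
--         "standard chartered", "linkedin", "leetcode", "payoneer"
--     ]
--
--     text_lower = email_text.lower()
--
--     for keyword in trusted_keywords:
--         if keyword in text_lower:
--             return "Not Spam"
--
--     return model_prediction
-- ===== SOURCE B (Python) =====
-- def custom_filter(email_text, model_prediction):
--     trusted_keywords = [
--         "meezan bank", "hbl", "mcb", "ubl", "askari bank",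
--         "standard chartered", "linkedin", "leetcode", "payoneer"
--     ]
--
--     text_lower = email_text.lower()
--
--     # single left-to-right scan: at each position, test whether any keyword starts there
--     for i in range(len(text_lower)):
--         for keyword in trusted_keywords:
--             if text_lower.startswith(keyword, i):
--                 return "Not Spam"
--
--     return model_prediction
-- ===== Notes on version B (the rewrite author's own statement) =====
-- stated objective: alternative
-- what changed: Replaces nine independent whole-text substring searches (one per keyword) by a single left-to-right position scan that tests all keywords at each position, like a naive multi-pattern matcher.
import Mathlib
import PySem

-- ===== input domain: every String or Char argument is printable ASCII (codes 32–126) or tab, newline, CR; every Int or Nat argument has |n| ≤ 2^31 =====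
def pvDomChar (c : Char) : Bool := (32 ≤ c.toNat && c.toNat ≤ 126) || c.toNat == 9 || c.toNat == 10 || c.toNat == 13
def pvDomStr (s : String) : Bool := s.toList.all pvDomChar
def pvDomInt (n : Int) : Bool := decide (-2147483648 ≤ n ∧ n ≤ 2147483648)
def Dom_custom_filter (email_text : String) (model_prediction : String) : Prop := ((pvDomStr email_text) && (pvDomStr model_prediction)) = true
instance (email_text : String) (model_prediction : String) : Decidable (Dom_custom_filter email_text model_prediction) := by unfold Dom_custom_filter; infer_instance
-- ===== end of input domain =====

-- B replaces A's keyword-by-keyword whole-text substring searches by a single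
-- left-to-right position scan testing all keywords at each position (alternative, same cost).

-- ===== PORT A =====
def pvKeywords : List (List Char) :=
  [ "meezan bank".toList, "hbl".toList, "mcb".toList, "ubl".toList, "askari bank".toList,
    "standard chartered".toList, "linkedin".toList, "leetcode".toList, "payoneer".toList ]

-- A's loop: first keyword that is a substring of the lowered text returns "Not Spam"
def pvLoopA : List (List Char) → List Char → String → String
  | [], _, mp => mp
  | k :: ks, t, mp => if PySem.Chars.isIn k t then "Not Spam" else pvLoopA ks t mp

def custom_filter (email_text : String) (model_prediction : String) : String :=
  pvLoopA pvKeywords (PySem.Chars.lower email_text.toList) model_prediction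

-- ===== PORT B =====
-- inner loop: does some keyword start at this position (= prefix of this suffix)?
def pvHitB : List (List Char) → List Char → Bool
  | [], _ => false
  | k :: ks, suf => PySem.Chars.startswith suf k || pvHitB ks suf

-- outer loop over positions i = 0 .. len-1, i.e. over nonempty suffixes of the text
def pvScanB : List Char → Bool
  | [] => false
  | c :: rest => pvHitB pvKeywords (c :: rest) || pvScanB rest

def custom_filter_alt (email_text : String) (model_prediction : String) : String :=
  if pvScanB (PySem.Chars.lower email_text.toList) then "Not Spam" else model_prediction

-- ===== PRECONDITION & SPEC =====
def Spec_custom_filter (email_text : String) (model_prediction : String) (out : String) : Prop := out = custom_filter_alt email_text model_prediction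
instance (email_text : String) (model_prediction : String) (out : String) : Decidable (Spec_custom_filter email_text model_prediction out) := by unfold Spec_custom_filter; infer_instance

-- ===== CLAIM (what is proved, stated in full; the proofs are below) =====
def Claim_equal_custom_filter : Prop := ∀ (email_text : String) (model_prediction : String), Dom_custom_filter email_text model_prediction → Spec_custom_filter email_text model_prediction (custom_filter email_text model_prediction)

-- ===== LEMMAS AND PROOFS =====

theorem pvHitB_iff (kws : List (List Char)) (suf : List Char) :
    pvHitB kws suf = true ↔ ∃ k ∈ kws, k <+: suf := by
  induction kws with
  | nil => simp [pvHitB]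
  | cons k ks ih =>
      simp [pvHitB, ih, PySem.Chars.startswith_iff]

theorem pvScanB_iff (t : List Char) (hne : ∀ k ∈ pvKeywords, k ≠ []) :
    pvScanB t = true ↔ ∃ k ∈ pvKeywords, k <:+: t := by
  induction t with
  | nil =>
      simp only [pvScanB, Bool.false_eq_true, false_iff]
      rintro ⟨k, hk, hinf⟩
      exact hne k hk (List.eq_nil_of_infix_nil hinf)
  | cons c rest ih =>
      simp only [pvScanB, Bool.or_eq_true, pvHitB_iff, ih]
      constructor
      · rintro (⟨k, hk, hp⟩ | ⟨k, hk, hi⟩)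
        · exact ⟨k, hk, hp.isInfix⟩
        · exact ⟨k, hk, hi.trans (List.suffix_cons c rest).isInfix⟩
      · rintro ⟨k, hk, hi⟩
        rcases List.infix_cons_iff.mp hi with hp | hi'
        · exact Or.inl ⟨k, hk, hp⟩
        · exact Or.inr ⟨k, hk, hi'⟩

theorem pvLoopA_eq (kws : List (List Char)) (t : List Char) (mp : String) :
    pvLoopA kws t mp = if kws.any (fun k => PySem.Chars.isIn k t) then "Not Spam" else mp := by
  induction kws with
  | nil => simp [pvLoopA]
  | cons k ks ih =>
      by_cases h : PySem.Chars.isIn k t = true <;> simp [pvLoopA, h, ih]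

-- ===== VERDICT (by name: the statement is the Claim_ definition above) =====
theorem custom_filter_spec : Claim_equal_custom_filter := by
  intro email_text model_prediction _
  unfold Spec_custom_filter custom_filter custom_filter_alt
  rw [pvLoopA_eq]
  congr 1
  rw [pvScanB_iff _ (by decide)]
  simp [List.any_eq_true, PySem.Chars.isIn_iff_infix]
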